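-- pv_equiv track=rewrite | github.com/J-Jaeh/algorithm | 프로그래머스/0/120843. 공 던지기/공 던지기.py | solution
-- ===== SOURCE A (Python) =====
-- from collections import deque
--
-- def solution(numbers, k):
--     # 2씩증가하는데 과연 k 번째 던지는 사람은 누구인가
--     # 원형큐만들어서 하고싶은데 or queq?
--     q = deque(numbers)
--     count = 1
--     while count != k:
--         q.append(q.popleft())
--         q.append(q.popleft())
--         count += 1
--
--     return q.popleft()
-- ===== SOURCE B (Python) =====
-- def solution(numbers, k):
--     # k-th throw lands at index 2*(k-1) around the circle: direct O(1) lookup.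
--     return numbers[(2 * (k - 1)) % len(numbers)]
-- ===== Notes on version B (the rewrite author's own statement) =====
-- stated objective: faster
-- what changed: Replaces the deque that is rotated twice per throw with a single closed-form index lookup numbers[(2*(k-1)) % len(numbers)].
import Mathlib
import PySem

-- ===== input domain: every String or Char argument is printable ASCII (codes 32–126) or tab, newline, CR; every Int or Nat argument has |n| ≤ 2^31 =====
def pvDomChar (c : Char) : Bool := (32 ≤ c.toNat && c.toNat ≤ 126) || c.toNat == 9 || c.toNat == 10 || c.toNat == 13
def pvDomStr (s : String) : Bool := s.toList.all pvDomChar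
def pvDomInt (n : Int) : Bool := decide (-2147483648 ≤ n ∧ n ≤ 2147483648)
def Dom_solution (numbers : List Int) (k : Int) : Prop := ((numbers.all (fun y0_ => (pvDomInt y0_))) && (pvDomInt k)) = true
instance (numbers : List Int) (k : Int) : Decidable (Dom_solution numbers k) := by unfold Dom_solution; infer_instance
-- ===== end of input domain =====

-- B replaces A's per-throw double deque rotation by one closed-form index lookup (O(1) vs O(k)).

-- ===== PORT A =====
-- q.append(q.popleft()) : move the front element to the back
def pvPop1 (q : List Int) : List Int :=
  match q with
  | [] => []
  | x :: xs => xs ++ [x]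

-- the while loop: runs while count != k, i.e. (k-1) times under Pre_ (1 ≤ k)
def pvALoop (q : List Int) : Nat → List Int
  | 0 => q
  | n + 1 => pvALoop (pvPop1 (pvPop1 q)) n

def solution (numbers : List Int) (k : Int) : Int :=
  ((pvALoop numbers (k - 1).toNat).headD 0)   -- final q.popleft(); q nonempty under Pre_

-- ===== PORT B =====
def solution_alt (numbers : List Int) (k : Int) : Int :=
  PySem.List.pyGetD numbers (PySem.Int.mod (2 * (k - 1)) (numbers.length : Int)) 0
  -- index is in range under Pre_ (nonempty list), so the default 0 is never used

-- ===== PRECONDITION & SPEC =====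
-- A raises IndexError on an empty list and loops forever when k < 1 (count starts at 1).
def Pre_solution (numbers : List Int) (k : Int) : Prop := numbers ≠ [] ∧ 1 ≤ k
instance (numbers : List Int) (k : Int) : Decidable (Pre_solution numbers k) := by
  unfold Pre_solution; infer_instance

def pvWitness_solution : List Int × Int := ([1, 2, 3, 4], 3)

def Spec_solution (numbers : List Int) (k : Int) (out : Int) : Prop := out = solution_alt numbers k
instance (numbers : List Int) (k : Int) (out : Int) : Decidable (Spec_solution numbers k out) := by
  unfold Spec_solution; infer_instance

-- ===== CLAIM (what is proved, stated in full; the proofs are below) =====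
def Claim_equal_solution : Prop := ∀ (numbers : List Int) (k : Int), Dom_solution numbers k → Pre_solution numbers k → Spec_solution numbers k (solution numbers k)

-- ===== LEMMAS AND PROOFS =====

theorem pvPop1_eq_rotate' (q : List Int) : pvPop1 q = q.rotate' 1 := by
  cases q with
  | nil => rfl
  | cons x xs => simp [pvPop1, List.rotate']

theorem pvALoop_eq_rotate' (n : Nat) (q : List Int) : pvALoop q n = q.rotate' (2 * n) := by
  induction n generalizing q with
  | zero => simp [pvALoop, List.rotate'_zero]
  | succ m ih =>
      simp only [pvALoop, ih, pvPop1_eq_rotate', List.rotate'_rotate']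
      congr 1
      omega

-- ===== VERDICT (by name: the statement is the Claim_ definition above) =====
theorem solution_spec : Claim_equal_solution := by
  intro numbers k _hdom ⟨hne, hk⟩
  have hlen : 0 < numbers.length := List.length_pos_iff.mpr hne
  unfold Spec_solution solution solution_alt
  set n : Nat := (k - 1).toNat with hn
  have hk1 : k - 1 = (n : Int) := by omega
  -- A's side: rotation
  rw [pvALoop_eq_rotate', ← List.rotate_eq_rotate', ← List.rotate_mod]
  have hmodlt : (2 * n) % numbers.length < numbers.length := Nat.mod_lt _ hlen
  have hhead? : (numbers.rotate ((2 * n) % numbers.length)).head? =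
      numbers[(2 * n) % numbers.length]? := List.head?_rotate hmodlt
  have hA : (numbers.rotate ((2 * n) % numbers.length)).headD 0 =
      numbers[(2 * n) % numbers.length] := by
    rw [List.headD_eq_head?_getD, hhead?, List.getElem?_eq_getElem hmodlt]
    rfl
  rw [hA]
  -- B's side: Python mod then lookup
  have h2 : 2 * (k - 1) = ((2 * n : Nat) : Int) := by omega
  have hmod : PySem.Int.mod (2 * (k - 1)) (numbers.length : Int) =
      (((2 * n) % numbers.length : Nat) : Int) := by
    rw [h2]
    rw [PySem.Int.mod_eq_emod_of_pos (by exact_mod_cast hlen)]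
    omega
  rw [hmod, PySem.List.pyGetD_natCast]
  rw [List.getD_eq_getElem?_getD, List.getElem?_eq_getElem hmodlt]
  rfl
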